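-- pv_equiv track=rewrite | github.com/Vicegale/Bee-Movie-Generator | beemovie.py | occurrenceMatrix
-- ===== SOURCE A (Python) =====
-- def occurrenceMatrix(key, text):
--     text = text.split(' ')
--     matrix = [[0 for i in range(len(key))] for i in range(len(key))]
--     for word in key:
--       wordIndex = key.index(word)
--       locations = [i for i,x in enumerate(text) if x == word]
--       for i in locations:
--         if i != len(text)-1:
--           nextWord = text[i+1]
--           nextWordIndex = key.index(nextWord)
--           matrix[wordIndex][nextWordIndex] = matrix[wordIndex][nextWordIndex] + 1
--     return matrix
-- ===== SOURCE B (Python) =====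
-- def occurrenceMatrix(key, text):
--     words = text.split(' ')
--     n = len(key)
--     index = {}
--     for i, w in enumerate(key):
--         index.setdefault(w, i)
--     matrix = [[0] * n for _ in range(n)]
--     for a, b in zip(words, words[1:]):
--         if a in index:
--             matrix[index[a]][index[b]] += 1
--     return matrix
-- ===== Notes on version B (the rewrite author's own statement) =====
-- stated objective: alternative
-- what changed: Replaces the per-key-word scans (key.index inside a double loop plus a full enumerate-scan of the text for every key word) by one first-index dict built in a single pass over key, then a single pass over the word adjacencies of the text; intended as faster, measured ~2x at n=4096 but unconfirmed at the largest size (the n x n output dominates).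
-- intended difference: When key contains a duplicated word that occurs in the text immediately followed by another key word, A loops over every duplicate slot (all resolving via key.index to the first slot) and so adds each such adjacency once per duplicate, returning inflated counts; B counts each adjacency exactly once, which is the intended occurrence count. — e.g. on occurrenceMatrix(["a", "a", "b"], "a b"): A returns [[0, 0, 2], [0, 0, 0], [0, 0, 0]], B returns [[0, 0, 1], [0, 0, 0], [0, 0, 0]]
import Mathlib
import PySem

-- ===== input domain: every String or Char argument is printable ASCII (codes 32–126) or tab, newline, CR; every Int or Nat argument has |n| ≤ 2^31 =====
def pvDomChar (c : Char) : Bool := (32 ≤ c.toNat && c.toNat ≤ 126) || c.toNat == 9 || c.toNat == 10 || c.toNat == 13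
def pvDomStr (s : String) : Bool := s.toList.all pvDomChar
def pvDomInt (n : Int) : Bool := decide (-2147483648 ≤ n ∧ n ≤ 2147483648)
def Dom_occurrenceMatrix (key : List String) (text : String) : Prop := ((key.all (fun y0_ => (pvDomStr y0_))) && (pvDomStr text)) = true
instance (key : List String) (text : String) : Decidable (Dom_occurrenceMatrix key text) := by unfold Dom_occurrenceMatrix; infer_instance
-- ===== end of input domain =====

-- B replaces A's per-key-word text scans and repeated key.index calls by one first-index dict
-- built in a single pass over key, then a single pass over the word adjacencies of the text.

-- text.split(' ') (sep ≠ "", so Python never raises here; the `none` branch is unreachable)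
def pvWords (text : String) : List String := (PySem.Str.split? text " ").getD []

-- m[r][c] = m[r][c] + k  (both Pythons do exactly this in-place update)
def pvBump (m : List (List Int)) (r c : Nat) (k : Int) : List (List Int) :=
  m.modify r (fun row => row.modify c (· + k))

-- ===== PORT A =====
def occurrenceMatrix (key : List String) (text : String) : List (List Int) :=
  let t := pvWords text
  let matrix := (PySem.List.pyRange 0 (PySem.List.len key) 1).map
    (fun _ => (PySem.List.pyRange 0 (PySem.List.len key) 1).map (fun _ => (0 : Int)))
  key.foldl (fun matrix word =>
    match PySem.List.index? key word with
    | none => matrix          -- unreachable: word ∈ key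
    | some wordIndex =>
      let locations := ((PySem.List.enumerate t).filter (fun p => p.2 == word)).map (·.1)
      locations.foldl (fun matrix i =>
        if i ≠ PySem.List.len t - 1 then
          match PySem.List.pyGet? t (i + 1) with
          | none => matrix    -- unreachable: 0 ≤ i < len t - 1
          | some nextWord =>
            match PySem.List.index? key nextWord with
            | none => matrix  -- Python raises ValueError here; excluded by Pre_
            | some nextWordIndex => pvBump matrix wordIndex nextWordIndex 1
        else matrix) matrix) matrix

-- ===== PORT B =====
def occurrenceMatrix_alt (key : List String) (text : String) : List (List Int) :=
  let words := pvWords text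
  let n := key.length
  let index := (key.zipIdx).foldl (fun d p => d.setdefault p.1 p.2)
    (PySem.Dict.empty : PySem.Dict String Nat)
  let matrix := (List.range n).map (fun _ => List.replicate n (0 : Int))
  (words.zip (PySem.List.slice words (some 1) none)).foldl (fun matrix p =>
    if index.contains p.1 then
      match index.get? p.1, index.get? p.2 with
      | some r, some c => pvBump matrix r c 1
      | _, _ => matrix      -- index[b] missing: Python raises KeyError; excluded by Pre_
    else matrix) matrix

-- ===== PRECONDITION & SPEC =====
-- Pre_ excludes exactly the inputs where A raises ValueError (key.index(nextWord) with
-- nextWord not in key): some word of the text that is in key is immediately followed by a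
-- word not in key.  B raises KeyError on the same inputs.
def Pre_occurrenceMatrix (key : List String) (text : String) : Prop :=
  ∀ p ∈ (pvWords text).zip (pvWords text).tail, p.1 ∈ key → p.2 ∈ key
instance (key : List String) (text : String) : Decidable (Pre_occurrenceMatrix key text) := by
  unfold Pre_occurrenceMatrix; infer_instance
def pvWitness_occurrenceMatrix : List String × String := (["a", "b"], "a b b a")

-- When key contains a duplicated word that occurs in the text immediately followed by another
-- key word, A loops over every duplicate slot (each resolving via key.index to the first slot)
-- and so adds that adjacency once per duplicate, returning inflated counts; B counts each
-- adjacency exactly once, which is the intended occurrence count.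
def D_occurrenceMatrix (key : List String) (text : String) : Prop :=
  ∃ p ∈ (pvWords text).zip (pvWords text).tail, p.1 ∈ key ∧ 2 ≤ key.count p.1
instance (key : List String) (text : String) : Decidable (D_occurrenceMatrix key text) := by
  unfold D_occurrenceMatrix; infer_instance

def Spec_occurrenceMatrix (key : List String) (text : String) (out : List (List Int)) : Prop := ¬ D_occurrenceMatrix key text → out = occurrenceMatrix_alt key text
instance (key : List String) (text : String) (out : List (List Int)) : Decidable (Spec_occurrenceMatrix key text out) := by unfold Spec_occurrenceMatrix; infer_instance

def pvDiffWitness_occurrenceMatrix : List String × String := (["a", "a", "b"], "a b")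
def pvDiffWitnessOut_occurrenceMatrix : (List (List Int)) × (List (List Int)) :=
  ([[0, 0, 2], [0, 0, 0], [0, 0, 0]], [[0, 0, 1], [0, 0, 0], [0, 0, 0]])

-- ===== CLAIM (what is proved, stated in full; the proofs are below) =====
def Claim_unchanged_occurrenceMatrix : Prop := ∀ (key : List String) (text : String), Dom_occurrenceMatrix key text → Pre_occurrenceMatrix key text → Spec_occurrenceMatrix key text (occurrenceMatrix key text)
def Claim_changed_occurrenceMatrix : Prop := Dom_occurrenceMatrix (pvDiffWitness_occurrenceMatrix.1) (pvDiffWitness_occurrenceMatrix.2) ∧ Pre_occurrenceMatrix (pvDiffWitness_occurrenceMatrix.1) (pvDiffWitness_occurrenceMatrix.2) ∧ D_occurrenceMatrix (pvDiffWitness_occurrenceMatrix.1) (pvDiffWitness_occurrenceMatrix.2) ∧ occurrenceMatrix (pvDiffWitness_occurrenceMatrix.1) (pvDiffWitness_occurrenceMatrix.2) = pvDiffWitnessOut_occurrenceMatrix.1 ∧ occurrenceMatrix_alt (pvDiffWitness_occurrenceMatrix.1) (pvDiffWitness_occurrenceMatrix.2) = pvDiffWitnessOut_occurrenceMatrix.2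 ∧ pvDiffWitnessOut_occurrenceMatrix.1 ≠ pvDiffWitnessOut_occurrenceMatrix.2
def Claim_exact_occurrenceMatrix : Prop := ∀ (key : List String) (text : String), Dom_occurrenceMatrix key text → Pre_occurrenceMatrix key text → D_occurrenceMatrix key text → occurrenceMatrix key text ≠ occurrenceMatrix_alt key text

-- ===== LEMMAS AND PROOFS =====

-- proof-only abbreviations
def pvP (t : List String) : List (String × String) := t.zip t.tail
def pvIdx (key : List String) (x : String) : Nat := (PySem.List.index? key x).getD 0
def pvZero (n : Nat) : List (List Int) := List.replicate n (List.replicate n 0)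
def pvEntry (m : List (List Int)) (i j : Nat) : Int := (m.getD i []).getD j 0
def pvStep (m : List (List Int)) (t : Nat × Nat × Int) : List (List Int) := pvBump m t.1 t.2.1 t.2.2
def pvTot (m : List (List Int)) : Int := (m.map List.sum).sum

lemma pvIdx_some {key : List String} {x : String} (h : x ∈ key) :
    PySem.List.index? key x = some (pvIdx key x) := by
  have h1 : (PySem.List.index? key x).isSome := (PySem.List.index?_isSome_iff key x).mpr h
  obtain ⟨k, hk⟩ := Option.isSome_iff_exists.mp h1
  simp only [pvIdx, hk, Option.getD_some]

lemma pvIdx_lt {key : List String} {x : String} (h : x ∈ key) : pvIdx key x < key.length := by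
  obtain ⟨hk, -, -⟩ := PySem.List.getElem_of_index?_eq_some (pvIdx_some h)
  exact hk

-- bump shape and entries
lemma pvBump_length (m : List (List Int)) (r c : Nat) (k : Int) :
    (pvBump m r c k).length = m.length := by
  simp [pvBump, List.length_modify]

lemma pvBump_rows {n : Nat} (m : List (List Int)) (r c : Nat) (k : Int)
    (h : ∀ row ∈ m, row.length = n) : ∀ row ∈ pvBump m r c k, row.length = n := by
  intro row hrow
  obtain ⟨idx, hidx, hget⟩ := List.mem_iff_getElem.mp hrow
  simp only [pvBump] at hget
  rw [List.getElem_modify] at hget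
  split at hget
  · simpa [← hget, List.length_modify] using h _ (List.getElem_mem _)
  · simpa [← hget] using h _ (List.getElem_mem _)

lemma pvBump_entry (m : List (List Int)) (r c : Nat) (k : Int) (i j : Nat)
    (hr : r < m.length) (hc : ∀ row ∈ m, c < row.length) :
    pvEntry (pvBump m r c k) i j = pvEntry m i j + (if r = i ∧ c = j then k else 0) := by
  simp only [pvEntry, pvBump, List.getD_eq_getElem?_getD, List.getElem?_modify,
    Option.map_eq_map]
  by_cases hi : i < m.length
  · rw [List.getElem?_eq_getElem hi]
    by_cases hri : r = i
    · subst hri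
      simp only [Option.map_some, Option.getD_some, true_and, if_true]
      rw [List.getElem?_modify]
      by_cases hj : j < m[r].length
      · rw [List.getElem?_eq_getElem hj]
        by_cases hcj : c = j <;> simp [hcj]
      · have hcr : c < m[r].length := hc _ (List.getElem_mem hi)
        rw [List.getElem?_eq_none (by omega)]
        have hcj : ¬ (c = j) := by omega
        simp [hcj]
    · have hcond : ¬ (r = i ∧ c = j) := fun h => hri h.1
      simp [hri]
  · have hri : r ≠ i := by omega
    have hcond : ¬ (r = i ∧ c = j) := fun h => hri h.1
    rw [show m[i]? = none from List.getElem?_eq_none (by omega)]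
    simp [hcond]

lemma pvFoldBump_shape {n : Nat} (L : List (Nat × Nat × Int)) :
    ∀ (m : List (List Int)), m.length = n → (∀ row ∈ m, row.length = n) →
      (L.foldl pvStep m).length = n ∧ ∀ row ∈ L.foldl pvStep m, row.length = n := by
  induction L with
  | nil => intro m h1 h2; exact ⟨h1, h2⟩
  | cons t L ih =>
    intro m h1 h2
    exact ih _ (by rw [pvStep, pvBump_length]; exact h1) (pvBump_rows _ _ _ _ h2)

lemma pvFoldBump_entry {n : Nat} (L : List (Nat × Nat × Int)) (i j : Nat) :
    ∀ (m : List (List Int)), m.length = n → (∀ row ∈ m, row.length = n) →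
      (∀ t ∈ L, t.1 < n ∧ t.2.1 < n) →
      pvEntry (L.foldl pvStep m) i j
        = pvEntry m i j + (L.map (fun t => if t.1 = i ∧ t.2.1 = j then t.2.2 else 0)).sum := by
  induction L with
  | nil => intro m _ _ _; simp
  | cons t L ih =>
    intro m h1 h2 hL
    have ht := hL t (by simp)
    have hlen : (pvBump m t.1 t.2.1 t.2.2).length = n := by rw [pvBump_length]; exact h1
    rw [List.foldl_cons, show pvStep m t = pvBump m t.1 t.2.1 t.2.2 from rfl]
    rw [ih _ hlen (pvBump_rows _ _ _ _ h2) (fun t ht => hL t (by simp [ht]))]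
    rw [pvBump_entry _ _ _ _ _ _ (by omega) (fun row hrow => by rw [h2 row hrow]; exact ht.2)]
    simp [add_assoc]

-- total-sum lemmas (for the tightness theorem)
lemma pvRow_modify_sum (k : Int) : ∀ (row : List Int) (c : Nat), c < row.length →
    (row.modify c (· + k)).sum = row.sum + k := by
  intro row
  induction row with
  | nil => intro c hc; simp at hc
  | cons x row ih =>
    intro c hc
    cases c with
    | zero => simp [List.modify]; ring
    | succ c =>
      have h0 : (x :: row).modify (c + 1) (· + k) = x :: row.modify c (· + k) := rfl
      rw [h0, List.sum_cons, List.sum_cons, ih c (by simpa using hc)]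
      ring

lemma pvBump_tot (k : Int) : ∀ (m : List (List Int)) (r c : Nat), r < m.length →
    (∀ row ∈ m, c < row.length) → pvTot (pvBump m r c k) = pvTot m + k := by
  intro m
  induction m with
  | nil => intro r c hr; simp at hr
  | cons row m ih =>
    intro r c hr hc
    cases r with
    | zero =>
      have h0 : pvBump (row :: m) 0 c k = (row.modify c (· + k)) :: m := rfl
      rw [h0]
      simp only [pvTot, List.map_cons, List.sum_cons]
      rw [pvRow_modify_sum k row c (hc row (by simp))]
      ring
    | succ r =>
      have h0 : pvBump (row :: m) (r + 1) c k = row :: pvBump m r c k := rfl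
      have hrec := ih r c (by simpa using hr) (fun row hrow => hc row (by simp [hrow]))
      simp only [pvTot] at hrec
      rw [h0]
      simp only [pvTot, List.map_cons, List.sum_cons]
      rw [hrec]
      ring

lemma pvFoldBump_tot {n : Nat} (L : List (Nat × Nat × Int)) :
    ∀ (m : List (List Int)), m.length = n → (∀ row ∈ m, row.length = n) →
      (∀ t ∈ L, t.1 < n ∧ t.2.1 < n) →
      pvTot (L.foldl pvStep m) = pvTot m + (L.map (·.2.2)).sum := by
  induction L with
  | nil => intro m _ _ _; simp
  | cons t L ih =>
    intro m h1 h2 hL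
    have ht := hL t (by simp)
    rw [List.foldl_cons, show pvStep m t = pvBump m t.1 t.2.1 t.2.2 from rfl]
    rw [ih _ (by rw [pvBump_length]; exact h1) (pvBump_rows _ _ _ _ h2)
      (fun t ht => hL t (by simp [ht]))]
    rw [pvBump_tot _ _ _ _ (by omega) (fun row hrow => by rw [h2 row hrow]; exact ht.2)]
    simp [add_assoc]

-- the zero matrices of the two ports
lemma pvA_zero (key : List String) :
    (PySem.List.pyRange 0 (PySem.List.len key) 1).map
      (fun _ => (PySem.List.pyRange 0 (PySem.List.len key) 1).map (fun _ => (0 : Int)))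
    = pvZero key.length := by
  simp [List.map_const', PySem.List.length_pyRange_one, pvZero, PySem.List.len]

lemma pvB_zero (n : Nat) :
    (List.range n).map (fun _ => List.replicate n (0 : Int)) = pvZero n := by
  simp [List.map_const', pvZero]

lemma pvZero_shape (n : Nat) : (pvZero n).length = n ∧ ∀ row ∈ pvZero n, row.length = n := by
  constructor
  · simp [pvZero]
  · intro row hrow
    rw [List.eq_of_mem_replicate hrow]
    simp

lemma pvZero_tot (n : Nat) : pvTot (pvZero n) = 0 := by
  simp [pvTot, pvZero, List.map_replicate]

-- A's locations loop: enumerate-filter indices + guarded lookups ≡ fold over adjacency pairs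
lemma pvLocNextGen (w : String) (u : List String) : ∀ (pre : List String),
    ((((PySem.List.enumerate u (pre.length : Int)).filter (fun p => p.2 == w)).map (·.1)).filterMap
      (fun i => if i ≠ PySem.List.len (pre ++ u) - 1 then PySem.List.pyGet? (pre ++ u) (i + 1) else none))
    = ((pvP u).filter (fun p => p.1 == w)).map (·.2) := by
  induction u with
  | nil => intro pre; simp [PySem.List.enumerate_nil, pvP]
  | cons a u ih =>
    intro pre
    rw [PySem.List.enumerate_cons]
    cases u with
    | nil =>
      have hlen1 : PySem.List.len (pre ++ [a]) - 1 = (pre.length : Int) := by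
        rw [PySem.List.len_eq]
        simp
      simp only [PySem.List.enumerate_nil, List.filter_cons]
      by_cases h : a == w
      · rw [if_pos (by simpa using h)]
        simp only [List.filter_nil, List.map_cons, List.map_nil, List.filterMap_cons,
          List.filterMap_nil]
        rw [if_neg (by rw [hlen1]; simp)]
        simp [pvP]
      · rw [if_neg (by simpa using h)]
        simp [pvP]
    | cons b u' =>
      have hrec := ih (pre ++ [a])
      have happ : pre ++ a :: b :: u' = (pre ++ [a]) ++ (b :: u') := by simp
      have hlen : ((pre ++ [a]).length : Int) = (pre.length : Int) + 1 := by simp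
      have hlen2 : PySem.List.len ((pre ++ [a]) ++ b :: u')
          = (pre.length : Int) + 2 + (u'.length : Int) := by
        rw [PySem.List.len_eq]
        simp
        ring
      rw [happ]
      have hP : pvP (a :: b :: u') = (a, b) :: pvP (b :: u') := by simp [pvP]
      rw [hP, List.filter_cons, List.filter_cons]
      by_cases h : a == w
      · rw [if_pos (by simpa using h), if_pos (by simpa using h)]
        simp only [List.map_cons, List.filterMap_cons]
        rw [if_pos (by rw [hlen2]; omega)]
        have hget : PySem.List.pyGet? ((pre ++ [a]) ++ b :: u') ((pre.length : Int) + 1)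
            = some b := by
          have hc : (pre.length : Int) + 1 = ((pre.length + 1 : Nat) : Int) := by push_cast; ring
          rw [hc, PySem.List.pyGet?_natCast]
          rw [List.getElem?_append_right (by simp)]
          simp
        rw [hget, ← hlen, hrec]
      · rw [if_neg (by simpa using h), if_neg (by simpa using h), ← hlen, hrec]

lemma pvLocFold (t : List String) (w : String)
    (f : List (List Int) → String → List (List Int)) (m0 : List (List Int)) :
    (((PySem.List.enumerate t).filter (fun p => p.2 == w)).map (·.1)).foldl
      (fun m i => if i ≠ PySem.List.len t - 1 then
          match PySem.List.pyGet? t (i + 1) with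
          | none => m
          | some nw => f m nw
        else m) m0
    = (((pvP t).filter (fun p => p.1 == w)).map (·.2)).foldl f m0 := by
  have hfun : (fun (m : List (List Int)) (i : Int) => if i ≠ PySem.List.len t - 1 then
        match PySem.List.pyGet? t (i + 1) with
        | none => m
        | some nw => f m nw
      else m)
      = (fun m i =>
        match (if i ≠ PySem.List.len t - 1 then PySem.List.pyGet? t (i + 1) else none) with
        | some nw => f m nw
        | none => m) := by
    funext m i
    by_cases h : i ≠ PySem.List.len t - 1
    · rw [if_pos h, if_pos h]
      cases PySem.List.pyGet? t (i + 1) <;> rfl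
    · rw [if_neg h, if_neg h]
  rw [hfun]
  have hgen : ∀ (l : List Int) (m0 : List (List Int)),
      l.foldl (fun m i =>
        match (if i ≠ PySem.List.len t - 1 then PySem.List.pyGet? t (i + 1) else none) with
        | some nw => f m nw
        | none => m) m0
      = (l.filterMap
          (fun i => if i ≠ PySem.List.len t - 1 then PySem.List.pyGet? t (i + 1) else none)).foldl
          f m0 := by
    intro l
    induction l with
    | nil => intro m0; rfl
    | cons x l ih =>
      intro m0
      rw [List.foldl_cons, List.filterMap_cons]
      cases hx : (if x ≠ PySem.List.len t - 1 then PySem.List.pyGet? t (x + 1) else none) with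
      | none => exact ih _
      | some nw => rw [List.foldl_cons]; exact ih _
  rw [hgen]
  have h0 := pvLocNextGen w t []
  simp only [List.length_nil, Nat.cast_zero, List.nil_append] at h0
  rw [h0]

-- B's setdefault dict is key.index
lemma pvFirst_gen (x : String) (key : List String) : ∀ (s : Nat) (d : PySem.Dict String Nat),
    ((key.zipIdx s).foldl (fun d p => d.setdefault p.1 p.2) d).get? x
    = if d.contains x then d.get? x else (PySem.List.index? key x).map (· + s) := by
  induction key with
  | nil =>
    intro s d
    by_cases h : d.contains x
    · simp [h]
    · simp [h, PySem.Dict.get?_eq_none_iff_contains, PySem.List.index?]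
  | cons w key ih =>
    intro s d
    rw [List.zipIdx_cons, List.foldl_cons]
    by_cases hdw : d.contains w
    · rw [show (d.setdefault w s) = d from PySem.Dict.setdefault_of_contains _ _ hdw, ih]
      by_cases hx : x = w
      · subst hx
        simp [hdw]
      · rw [PySem.List.index?_cons_of_ne key (fun h => hx h.symm)]
        by_cases hdx : d.contains x
        · simp [hdx]
        · simp only [if_neg hdx, Option.map_map]
          congr 1
          funext a
          simp
          omega
    · rw [show (d.setdefault w s) = d.insert w s from PySem.Dict.setdefault_of_not_contains _ _
        (by simpa using hdw), ih]
      by_cases hx : x = w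
      · subst hx
        have h1 : (d.insert x s).contains x = true := by
          simp
        rw [if_pos h1, PySem.Dict.get?_insert_self, if_neg (by simp [hdw]),
          PySem.List.index?_cons_self]
        simp
      · have h1 : (d.insert w s).contains x = d.contains x := by
          simp [PySem.Dict.contains_insert, hx]
        rw [h1, PySem.Dict.get?_insert_of_ne _ _ hx,
          PySem.List.index?_cons_of_ne key (fun h => hx h.symm)]
        by_cases hdx : d.contains x
        · simp [hdx]
        · simp only [if_neg hdx, Option.map_map]
          congr 1
          funext a
          simp
          omega

lemma pvFirst_get (x : String) (key : List String) :
    ((key.zipIdx).foldl (fun d p => d.setdefault p.1 p.2)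
      (PySem.Dict.empty : PySem.Dict String Nat)).get? x = PySem.List.index? key x := by
  rw [pvFirst_gen x key 0 PySem.Dict.empty]
  simp [PySem.Dict.contains_empty]

-- sum helpers
lemma pvSumIfConst (key : List String) (a : String) (c : Int) :
    (key.map (fun w => if w = a then c else 0)).sum = (key.count a : Int) * c := by
  induction key with
  | nil => simp
  | cons w key ih =>
    by_cases h : w = a
    · subst h
      simp [ih, add_mul]
      ring
    · simp [h, ih]

-- the interchange: A's per-key-word entries = count-weighted per-adjacency entries
lemma pvSwap (key : List String) (P : List (String × String)) (i j : Nat) :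
    (key.map (fun w =>
      (((P.filter (fun p => p.1 == w)).map
        (fun p => if pvIdx key w = i ∧ pvIdx key p.2 = j then (1 : Int) else 0))).sum)).sum
    = ((P.filter (fun p => decide (p.1 ∈ key))).map
        (fun p => if pvIdx key p.1 = i ∧ pvIdx key p.2 = j then (key.count p.1 : Int) else 0)).sum := by
  induction P with
  | nil => simp
  | cons p P ih =>
    have hL : key.map (fun w =>
        ((((p :: P).filter (fun q => q.1 == w)).map
          (fun q => if pvIdx key w = i ∧ pvIdx key q.2 = j then (1 : Int) else 0))).sum)
      = key.map (fun w =>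
          (if w = p.1 then (if pvIdx key p.1 = i ∧ pvIdx key p.2 = j then (1 : Int) else 0) else 0)
          + (((P.filter (fun q => q.1 == w)).map
              (fun q => if pvIdx key w = i ∧ pvIdx key q.2 = j then (1 : Int) else 0))).sum) := by
      apply List.map_congr_left
      intro w _
      rw [List.filter_cons]
      by_cases h : p.1 = w
      · subst h
        simp
      · have hb : (p.1 == w) = false := by simp [h]
        simp [hb, Ne.symm h]
    rw [hL, PySem.List.sum_map_add_int, pvSumIfConst, ih, List.filter_cons]
    by_cases hm : p.1 ∈ key
    · simp only [hm, decide_true, if_pos, List.map_cons, List.sum_cons]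
      split_ifs with hc
      · ring
      · ring
    · have hz : key.count p.1 = 0 := List.count_eq_zero_of_not_mem hm
      simp [hm, hz]

-- the same interchange at the level of totals
lemma pvSwapTot (key : List String) (P : List (String × String)) :
    (key.map (fun w =>
      ((P.filter (fun p => p.1 == w)).map (fun _ => (1 : Int))).sum)).sum
    = ((P.filter (fun p => decide (p.1 ∈ key))).map
        (fun p => (key.count p.1 : Int))).sum := by
  induction P with
  | nil => simp
  | cons p P ih =>
    have hL : key.map (fun w =>
        (((p :: P).filter (fun q => q.1 == w)).map (fun _ => (1 : Int))).sum)
      = key.map (fun w =>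
          (if w = p.1 then (1 : Int) else 0)
          + ((P.filter (fun q => q.1 == w)).map (fun _ => (1 : Int))).sum) := by
      apply List.map_congr_left
      intro w _
      rw [List.filter_cons]
      by_cases h : p.1 = w
      · subst h
        simp
      · have hb : (p.1 == w) = false := by simp [h]
        simp [hb, Ne.symm h]
    rw [hL, PySem.List.sum_map_add_int, pvSumIfConst, ih, List.filter_cons]
    by_cases hm : p.1 ∈ key
    · simp [hm]
    · have hz : key.count p.1 = 0 := List.count_eq_zero_of_not_mem hm
      simp [hm, hz]

-- canonical forms of the two ports (under Pre_)
lemma pvA_canon (key : List String) (text : String) (h : Pre_occurrenceMatrix key text) :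
    occurrenceMatrix key text
    = (key.flatMap (fun w => ((pvP (pvWords text)).filter (fun p => p.1 == w)).map
        (fun p => (pvIdx key w, pvIdx key p.2, (1 : Int))))).foldl pvStep (pvZero key.length) := by
  rw [List.foldl_flatMap]
  have h0 : occurrenceMatrix key text
      = key.foldl (fun matrix word =>
          match PySem.List.index? key word with
          | none => matrix
          | some wordIndex =>
            (((PySem.List.enumerate (pvWords text)).filter (fun p => p.2 == word)).map (·.1)).foldl
              (fun matrix i =>
                if i ≠ PySem.List.len (pvWords text) - 1 then
                  match PySem.List.pyGet? (pvWords text) (i + 1) with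
                  | none => matrix
                  | some nextWord =>
                    match PySem.List.index? key nextWord with
                    | none => matrix
                    | some nextWordIndex => pvBump matrix wordIndex nextWordIndex 1
                else matrix) matrix)
        ((PySem.List.pyRange 0 (PySem.List.len key) 1).map
          (fun _ => (PySem.List.pyRange 0 (PySem.List.len key) 1).map (fun _ => (0 : Int)))) := rfl
  rw [h0, pvA_zero]
  apply PySem.List.foldl_congr_mem
  intro m w hw
  simp only [pvIdx_some hw]
  rw [pvLocFold (pvWords text) w
    (fun matrix nextWord =>
      match PySem.List.index? key nextWord with
      | none => matrix
      | some nextWordIndex => pvBump matrix (pvIdx key w) nextWordIndex 1) m]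
  rw [List.foldl_map, List.foldl_map]
  apply PySem.List.foldl_congr_mem
  intro m' p hp
  obtain ⟨hpP, hbeq⟩ := List.mem_filter.mp hp
  have hw1 : p.1 = w := by simpa using hbeq
  have hp2 : p.2 ∈ key := h p hpP (hw1 ▸ hw)
  simp only [pvIdx_some hp2]
  rfl

lemma pvB_canon (key : List String) (text : String) (h : Pre_occurrenceMatrix key text) :
    occurrenceMatrix_alt key text
    = (((pvP (pvWords text)).filter (fun p => decide (p.1 ∈ key))).map
        (fun p => (pvIdx key p.1, pvIdx key p.2, (1 : Int)))).foldl pvStep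
        (pvZero key.length) := by
  have h0 : occurrenceMatrix_alt key text
      = ((pvWords text).zip (PySem.List.slice (pvWords text) (some 1) none)).foldl
          (fun matrix p =>
            if ((key.zipIdx).foldl (fun d p => d.setdefault p.1 p.2)
                (PySem.Dict.empty : PySem.Dict String Nat)).contains p.1 then
              match ((key.zipIdx).foldl (fun d p => d.setdefault p.1 p.2)
                  (PySem.Dict.empty : PySem.Dict String Nat)).get? p.1,
                ((key.zipIdx).foldl (fun d p => d.setdefault p.1 p.2)
                  (PySem.Dict.empty : PySem.Dict String Nat)).get? p.2 with
              | some r, some c => pvBump matrix r c 1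
              | _, _ => matrix
            else matrix)
          ((List.range key.length).map (fun _ => List.replicate key.length (0 : Int))) := rfl
  rw [h0, pvB_zero, PySem.List.slice_from_one]
  conv_rhs => rw [List.foldl_map, List.foldl_filter]
  apply PySem.List.foldl_congr_mem
  intro m p hp
  have hcont : ((key.zipIdx).foldl (fun d p => d.setdefault p.1 p.2)
      (PySem.Dict.empty : PySem.Dict String Nat)).contains p.1
      = (PySem.List.index? key p.1).isSome := by
    rw [PySem.Dict.contains_eq_isSome_get?, pvFirst_get]
  by_cases hm : p.1 ∈ key
  · have hp2 : p.2 ∈ key := h p hp hm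
    simp only [hcont, pvFirst_get, pvIdx_some hm, pvIdx_some hp2, Option.isSome_some,
      hm, decide_true, if_true]
    rfl
  · simp only [hcont, pvFirst_get, (PySem.List.index?_eq_none_iff key p.1).mpr hm,
      Option.isSome_none, hm, decide_false, Bool.false_eq_true, if_false]

lemma pvEntry_eq (M : List (List Int)) (i j : Nat) (h1 : i < M.length)
    (h2 : j < M[i].length) : pvEntry M i j = M[i][j] := by
  rw [pvEntry,
    show M.getD i [] = M[i] from by
      rw [List.getD_eq_getElem?_getD, List.getElem?_eq_getElem h1, Option.getD_some],
    List.getD_eq_getElem?_getD, List.getElem?_eq_getElem h2, Option.getD_some]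

lemma pvSumFlatMap (l : List String) (f : String → List Int) :
    (l.flatMap f).sum = (l.map (fun x => (f x).sum)).sum := by
  induction l with
  | nil => simp
  | cons x l ih => simp [List.flatMap_cons, List.sum_append, ih]

-- in-bounds of the triple lists
lemma pvA_bounds (key : List String) (text : String) (hpre : Pre_occurrenceMatrix key text) :
    ∀ tr ∈ key.flatMap (fun w => ((pvP (pvWords text)).filter (fun p => p.1 == w)).map
      (fun p => (pvIdx key w, pvIdx key p.2, (1 : Int)))),
      tr.1 < key.length ∧ tr.2.1 < key.length := by
  intro tr htr
  obtain ⟨w, hw, htr2⟩ := List.mem_flatMap.mp htr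
  obtain ⟨p, hp, rfl⟩ := List.mem_map.mp htr2
  obtain ⟨hpP, hbeq⟩ := List.mem_filter.mp hp
  have hw1 : p.1 = w := by simpa using hbeq
  have hp2 : p.2 ∈ key := hpre p hpP (hw1 ▸ hw)
  exact ⟨pvIdx_lt hw, pvIdx_lt hp2⟩

lemma pvB_bounds (key : List String) (text : String) (hpre : Pre_occurrenceMatrix key text) :
    ∀ tr ∈ ((pvP (pvWords text)).filter (fun p => decide (p.1 ∈ key))).map
      (fun p => (pvIdx key p.1, pvIdx key p.2, (1 : Int))),
      tr.1 < key.length ∧ tr.2.1 < key.length := by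
  intro tr htr
  obtain ⟨p, hp, rfl⟩ := List.mem_map.mp htr
  obtain ⟨hpP, hdec⟩ := List.mem_filter.mp hp
  have hm : p.1 ∈ key := of_decide_eq_true hdec
  exact ⟨pvIdx_lt hm, pvIdx_lt (hpre p hpP hm)⟩

-- ===== VERDICT (by name: the statements are the Claim_ definitions above) =====
theorem occurrenceMatrix_spec : Claim_unchanged_occurrenceMatrix := by
  intro key text _ hpre
  unfold Spec_occurrenceMatrix
  intro hnd
  rw [pvA_canon key text hpre, pvB_canon key text hpre]
  have hz := pvZero_shape key.length
  have hA := pvA_bounds key text hpre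
  have hB := pvB_bounds key text hpre
  obtain ⟨hsA1, hsA2⟩ := pvFoldBump_shape (n := key.length) _ _ hz.1 hz.2
  obtain ⟨hsB1, hsB2⟩ := pvFoldBump_shape (n := key.length) _ _ hz.1 hz.2
  apply List.ext_getElem (by rw [hsA1, hsB1])
  intro i hiA hiB
  apply List.ext_getElem
    (by rw [hsA2 _ (List.getElem_mem hiA), hsB2 _ (List.getElem_mem hiB)])
  intro j hjA hjB
  rw [← pvEntry_eq _ i j hiA hjA, ← pvEntry_eq _ i j hiB hjB,
    pvFoldBump_entry (n := key.length) _ i j _ hz.1 hz.2 hA,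
    pvFoldBump_entry (n := key.length) _ i j _ hz.1 hz.2 hB]
  congr 1
  have hswap := pvSwap key (pvP (pvWords text)) i j
  rw [List.map_flatMap, pvSumFlatMap]
  have hL : (key.map (fun w =>
      ((((pvP (pvWords text)).filter (fun p => p.1 == w)).map
        (fun p => (pvIdx key w, pvIdx key p.2, (1 : Int)))).map
        (fun t => if t.1 = i ∧ t.2.1 = j then t.2.2 else 0)).sum)).sum
      = (((pvP (pvWords text)).filter (fun p => decide (p.1 ∈ key))).map
          (fun p => if pvIdx key p.1 = i ∧ pvIdx key p.2 = j
            then (key.count p.1 : Int) else 0)).sum := by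
    rw [← hswap]
    simp [List.map_map, Function.comp_def]
  rw [hL, List.map_map]
  have hR : (((pvP (pvWords text)).filter (fun p => decide (p.1 ∈ key))).map
      ((fun t : Nat × Nat × Int => if t.1 = i ∧ t.2.1 = j then t.2.2 else 0) ∘
        (fun p => (pvIdx key p.1, pvIdx key p.2, (1 : Int)))))
      = ((pvP (pvWords text)).filter (fun p => decide (p.1 ∈ key))).map
          (fun p => if pvIdx key p.1 = i ∧ pvIdx key p.2 = j
            then (key.count p.1 : Int) else 0) := by
    apply List.map_congr_left
    intro p hp
    obtain ⟨hpP, hdec⟩ := List.mem_filter.mp hp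
    have hm : p.1 ∈ key := of_decide_eq_true hdec
    have hcnt : key.count p.1 = 1 := by
      have hge : 0 < key.count p.1 := List.count_pos_iff.mpr hm
      have hlt : ¬ 2 ≤ key.count p.1 := fun h2 => hnd ⟨p, hpP, hm, h2⟩
      omega
    simp [hcnt]
  rw [hR]

theorem occurrenceMatrix_changed : Claim_changed_occurrenceMatrix := by
  unfold Claim_changed_occurrenceMatrix; decide

theorem occurrenceMatrix_tight : Claim_exact_occurrenceMatrix := by
  intro key text _ hpre hd heq
  rw [pvA_canon key text hpre, pvB_canon key text hpre] at heq
  have hz := pvZero_shape key.length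
  have hA := pvA_bounds key text hpre
  have hB := pvB_bounds key text hpre
  have htot := congrArg pvTot heq
  rw [pvFoldBump_tot (n := key.length) _ _ hz.1 hz.2 hA,
    pvFoldBump_tot (n := key.length) _ _ hz.1 hz.2 hB, pvZero_tot] at htot
  have hTA : ((key.flatMap (fun w => ((pvP (pvWords text)).filter (fun p => p.1 == w)).map
      (fun p => (pvIdx key w, pvIdx key p.2, (1 : Int))))).map (·.2.2)).sum
      = (((pvP (pvWords text)).filter (fun p => decide (p.1 ∈ key))).map
          (fun p => (key.count p.1 : Int))).sum := by
    rw [List.map_flatMap, pvSumFlatMap, ← pvSwapTot key (pvP (pvWords text))]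
    simp [List.map_map, Function.comp_def]
  have hTB : ((((pvP (pvWords text)).filter (fun p => decide (p.1 ∈ key))).map
      (fun p => (pvIdx key p.1, pvIdx key p.2, (1 : Int)))).map (·.2.2)).sum
      = (((pvP (pvWords text)).filter (fun p => decide (p.1 ∈ key))).map
          (fun _ => (1 : Int))).sum := by
    simp [List.map_map, Function.comp_def]
  rw [hTA, hTB] at htot
  obtain ⟨p0, hp0P, hp0m, hp0c⟩ := hd
  have hp0F : p0 ∈ (pvP (pvWords text)).filter (fun p => decide (p.1 ∈ key)) :=
    List.mem_filter.mpr ⟨hp0P, decide_eq_true hp0m⟩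
  have hlt : (((pvP (pvWords text)).filter (fun p => decide (p.1 ∈ key))).map
        (fun _ => (1 : Int))).sum
      < (((pvP (pvWords text)).filter (fun p => decide (p.1 ∈ key))).map
          (fun p => (key.count p.1 : Int))).sum := by
    apply List.sum_lt_sum
    · intro p hp
      obtain ⟨-, hdec⟩ := List.mem_filter.mp hp
      have hm : p.1 ∈ key := of_decide_eq_true hdec
      have : 0 < key.count p.1 := List.count_pos_iff.mpr hm
      exact_mod_cast this
    · exact ⟨p0, hp0F, by exact_mod_cast hp0c⟩
  omega
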